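-- pv_equiv track=rewrite | github.com/mlepori1/Representations_Of_Syntax | Corpus_Processing/dependency_utils.py | string_const_tree
-- ===== SOURCE A (Python) =====
-- import copy
--
-- def string_const_tree(line, ipt_form):
--     ipt_form = copy.deepcopy(ipt_form)
--     line = line.split()
--     line = [l + str(i) for i, l in enumerate(line)]
--
--     first = True
--     for level_idx in range(len(ipt_form)):
--         for node_idx in range(len(ipt_form[level_idx])):
--             if first:
--                 ipt_form[level_idx][node_idx] = [line[ipt_form[level_idx][node_idx][0]]]
--
--             elif len(ipt_form[level_idx][node_idx]) == 1:
--                 ipt_form[level_idx][node_idx] = ipt_form[level_idx - 1][ipt_form[level_idx][node_idx][0]]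
--
--             elif len(ipt_form[level_idx][node_idx]) == 2:
--                 ipt_form[level_idx][node_idx] = ipt_form[level_idx - 1][ipt_form[level_idx][node_idx][0]] + ipt_form[level_idx - 1][ipt_form[level_idx][node_idx][1]]
--
--         first = False
--
--     return ipt_form
-- ===== SOURCE B (Python) =====
-- def string_const_tree(line, ipt_form):
--     labeled = [w + str(i) for i, w in enumerate(line.split())]
--
--     def span(level, node):
--         if level == 0:
--             return [labeled[node[0]]]
--         if len(node) == 1:
--             return span(level - 1, ipt_form[level - 1][node[0]])
--         if len(node) == 2:
--             return (span(level - 1, ipt_form[level - 1][node[0]])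
--                     + span(level - 1, ipt_form[level - 1][node[1]]))
--         return list(node)
--
--     return [[span(level, node) for node in lvl]
--             for level, lvl in enumerate(ipt_form)]
-- ===== Notes on version B (the rewrite author's own statement) =====
-- stated objective: alternative
-- what changed: Replaced the level-by-level in-place mutation that reuses the previously rewritten level with a pure recursive span(level, node) helper that recomputes each node's token list top-down from the original index structure, emitting a fresh list of levels.
-- outside the precondition, e.g. on string_const_tree('a b', [[[5]]]): A raises IndexError, B raises IndexError
import Mathlib
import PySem

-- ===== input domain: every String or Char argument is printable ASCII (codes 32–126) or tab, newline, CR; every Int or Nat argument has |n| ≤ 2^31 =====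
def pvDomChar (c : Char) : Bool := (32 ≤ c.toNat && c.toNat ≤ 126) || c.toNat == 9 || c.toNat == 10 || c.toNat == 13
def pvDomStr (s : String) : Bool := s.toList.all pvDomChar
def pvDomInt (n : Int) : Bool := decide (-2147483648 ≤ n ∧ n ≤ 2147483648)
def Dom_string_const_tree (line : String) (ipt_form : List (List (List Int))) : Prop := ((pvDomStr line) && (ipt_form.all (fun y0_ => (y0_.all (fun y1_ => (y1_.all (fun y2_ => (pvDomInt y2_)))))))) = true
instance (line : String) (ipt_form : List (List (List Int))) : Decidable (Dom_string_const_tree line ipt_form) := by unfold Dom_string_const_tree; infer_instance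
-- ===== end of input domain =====

-- B replaces A's level-by-level in-place mutation by a pure recursive span(level, node)
-- computed top-down from the original structure (objective: alternative decomposition).
-- Note: the Python A reassigns `ipt_form`/`line` locally (after a deepcopy), so the caller's
-- argument is NOT mutated; the equivalence is about the return value.

-- ===== PORT A =====
-- line = [l + str(i) for i, l in enumerate(line.split())]  (identical line in both Pythons)
def pvLabeled (line : String) : List String :=
  (PySem.List.enumerate (PySem.Str.split₀ line) 0).map (fun p => p.2 ++ PySem.Int.toStr p.1)

-- body of the level-0 (first = True) iteration: node := [line[node[0]]]
def pvFirstA (labeled : List String) (node : List Int) : List String :=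
  match node with
  | x :: _ => [(PySem.List.pyGet? labeled x).getD ""]
  | [] => []   -- node[0] raises IndexError in Python; excluded by Pre_

-- body of a later iteration, reading the already-processed previous level `prev`
def pvStepA (prev : List (List String)) (node : List Int) : List String :=
  match node with
  | [a] => (PySem.List.pyGet? prev a).getD []
  | [a, b] => (PySem.List.pyGet? prev a).getD [] ++ (PySem.List.pyGet? prev b).getD []
  | other => other.map PySem.Int.toStr   -- Python leaves the int node unchanged; excluded by Pre_ (not a List String)

-- the outer loop after level 0 (first = False), carrying the processed previous level
def pvLoopA (prev : List (List String)) : List (List (List Int)) → List (List (List String))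
  | [] => []
  | lvl :: rest =>
      let cur := lvl.map (pvStepA prev)
      cur :: pvLoopA cur rest

def string_const_tree (line : String) (ipt_form : List (List (List Int))) : List (List (List String)) :=
  let labeled := pvLabeled line
  match ipt_form with
  | [] => []
  | lvl0 :: rest =>
      let cur := lvl0.map (pvFirstA labeled)
      cur :: pvLoopA cur rest

-- ===== PORT B =====
-- span(level, node): value of a node, reading the ORIGINAL structure recursively
def pvSpan (labeled : List String) (ipt : List (List (List Int))) : Nat → List Int → List String
  | 0, node =>
      match node with
      | x :: _ => [(PySem.List.pyGet? labeled x).getD ""]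
      | [] => []   -- node[0] raises IndexError in Python; excluded by Pre_
  | l + 1, node =>
      match node with
      | [a] => pvSpan labeled ipt l ((PySem.List.pyGet? ((PySem.List.pyGet? ipt (l : Int)).getD []) a).getD [])
      | [a, b] =>
          pvSpan labeled ipt l ((PySem.List.pyGet? ((PySem.List.pyGet? ipt (l : Int)).getD []) a).getD [])
          ++ pvSpan labeled ipt l ((PySem.List.pyGet? ((PySem.List.pyGet? ipt (l : Int)).getD []) b).getD [])
      | other => other.map PySem.Int.toStr   -- Python returns list(node) (ints); excluded by Pre_

-- [[span(level, node) for node in lvl] for level, lvl in enumerate(ipt_form)]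
def pvBLevels (labeled : List String) (ipt : List (List (List Int))) :
    Nat → List (List (List Int)) → List (List (List String))
  | _, [] => []
  | l, lvl :: rest => lvl.map (pvSpan labeled ipt l) :: pvBLevels labeled ipt (l + 1) rest

def string_const_tree_alt (line : String) (ipt_form : List (List (List Int))) : List (List (List String)) :=
  pvBLevels (pvLabeled line) ipt_form 0 ipt_form

-- ===== PRECONDITION & SPEC =====
-- Pre_ excludes inputs where the Python raises IndexError (empty level-0 node, out-of-range
-- reference) and inputs where A returns a value outside the declared type List (List (List String)):
-- at level > 0 a node of length ≥ 3 is left as a list of ints (B's Python returns the same int list there).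
def Pre_string_const_tree (line : String) (ipt_form : List (List (List Int))) : Prop :=
  (∀ node ∈ ipt_form.headD [], node ≠ [] ∧
      PySem.Raise.InRange (PySem.Str.split₀ line).length (node.headD 0)) ∧
  (∀ p ∈ List.zip ipt_form ipt_form.tail, ∀ node ∈ p.2,
      node.length ≤ 2 ∧ ∀ a ∈ node, PySem.Raise.InRange p.1.length a)
instance (line : String) (ipt_form : List (List (List Int))) : Decidable (Pre_string_const_tree line ipt_form) := by
  unfold Pre_string_const_tree; infer_instance

def pvWitness_string_const_tree : String × List (List (List Int)) :=
  ("a b", [[[0], [1]], [[0, 1]]])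

def Spec_string_const_tree (line : String) (ipt_form : List (List (List Int))) (out : List (List (List String))) : Prop := out = string_const_tree_alt line ipt_form
instance (line : String) (ipt_form : List (List (List Int))) (out : List (List (List String))) : Decidable (Spec_string_const_tree line ipt_form out) := by unfold Spec_string_const_tree; infer_instance

-- ===== CLAIM (what is proved, stated in full; the proofs are below) =====
def Claim_equal_string_const_tree : Prop := ∀ (line : String) (ipt_form : List (List (List Int))), Dom_string_const_tree line ipt_form → Pre_string_const_tree line ipt_form → Spec_string_const_tree line ipt_form (string_const_tree line ipt_form)

-- ===== LEMMAS AND PROOFS =====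

theorem pvPyGet?_map {α β : Type} (f : α → β) (xs : List α) (i : Int) :
    PySem.List.pyGet? (xs.map f) i = (PySem.List.pyGet? xs i).map f := by
  simp [PySem.List.pyGet?, PySem.List.pyIdx?]

theorem pvGet_some {α : Type} (xs : List α) (i : Int) (h : PySem.Raise.InRange xs.length i) :
    ∃ v, PySem.List.pyGet? xs i = some v := by
  rcases Option.ne_none_iff_exists'.mp (fun hn => (PySem.List.pyGet?_eq_none_iff xs i).mp hn h) with ⟨v, hv⟩
  exact ⟨v, hv⟩

-- a single node of a level > 0 computes the same value in both ports
theorem pvStep_eq (labeled : List String) (ipt : List (List (List Int))) (k : Nat)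
    (lvlk : List (List Int)) (hk : PySem.List.pyGet? ipt (k : Int) = some lvlk)
    (node : List Int) (hlen : node.length ≤ 2)
    (href : ∀ a ∈ node, PySem.Raise.InRange lvlk.length a) :
    pvStepA (lvlk.map (pvSpan labeled ipt k)) node = pvSpan labeled ipt (k + 1) node := by
  match node with
  | [] => rfl
  | [a] =>
      obtain ⟨v, hv⟩ := pvGet_some lvlk a (href a (by simp))
      simp [pvStepA, pvSpan, pvPyGet?_map, hk, hv]
  | [a, b] =>
      obtain ⟨v, hv⟩ := pvGet_some lvlk a (href a (by simp))
      obtain ⟨w, hw⟩ := pvGet_some lvlk b (href b (by simp))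
      simp [pvStepA, pvSpan, pvPyGet?_map, hk, hv, hw]
  | a₁ :: a₂ :: a₃ :: t => simp at hlen

-- the rest of A's loop equals B's remaining levels
theorem pvLoop_eq (labeled : List String) (ipt : List (List (List Int))) :
    ∀ (rest : List (List (List Int))) (k : Nat) (lvlk : List (List Int)),
      PySem.List.pyGet? ipt (k : Int) = some lvlk →
      ipt.drop (k + 1) = rest →
      (∀ p ∈ List.zip ipt ipt.tail, ∀ node ∈ p.2,
          node.length ≤ 2 ∧ ∀ a ∈ node, PySem.Raise.InRange p.1.length a) →
      pvLoopA (lvlk.map (pvSpan labeled ipt k)) rest = pvBLevels labeled ipt (k + 1) rest := by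
  intro rest
  induction rest with
  | nil => intro k lvlk _ _ _; rfl
  | cons lvl rest' ih =>
      intro k lvlk hk hdrop hPre
      have hk1 : ipt[k + 1]? = some lvl := by
        have : (ipt.drop (k + 1))[0]? = ipt[k + 1 + 0]? := List.getElem?_drop
        rw [hdrop] at this; simpa using this.symm
      have hkk : ipt[k]? = some lvlk := by
        have := PySem.List.pyGet?_natCast (xs := ipt) (n := k)
        rw [hk] at this; exact this.symm
      have hmem : (lvlk, lvl) ∈ List.zip ipt ipt.tail := by
        have hz : (List.zip ipt ipt.tail)[k]? = some (lvlk, lvl) := by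
          rw [List.getElem?_zip_eq_some]
          exact ⟨hkk, by rw [List.getElem?_tail]; exact hk1⟩
        exact List.mem_of_getElem? hz
      have hcond := hPre (lvlk, lvl) hmem
      have hcur : lvl.map (pvStepA (lvlk.map (pvSpan labeled ipt k))) = lvl.map (pvSpan labeled ipt (k + 1)) :=
        List.map_congr_left (fun node hn =>
          pvStep_eq labeled ipt k lvlk hk node (hcond node hn).1 (hcond node hn).2)
      have hdrop' : ipt.drop (k + 1 + 1) = rest' := by
        have : ipt.drop (k + 1 + 1) = (ipt.drop (k + 1)).drop 1 := by rw [List.drop_drop]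
        rw [this, hdrop]; rfl
      have hk1' : PySem.List.pyGet? ipt ((k + 1 : Nat) : Int) = some lvl := by
        rw [PySem.List.pyGet?_natCast]; exact hk1
      show (lvl.map (pvStepA (lvlk.map (pvSpan labeled ipt k)))) ::
          pvLoopA (lvl.map (pvStepA (lvlk.map (pvSpan labeled ipt k)))) rest' = _
      rw [hcur, ih (k + 1) lvl hk1' hdrop' hPre]
      rfl

-- ===== VERDICT (by name: the statement is the Claim_ definition above) =====
theorem string_const_tree_spec : Claim_equal_string_const_tree := by
  intro line ipt _hDom hPre
  unfold Spec_string_const_tree string_const_tree string_const_tree_alt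
  cases ipt with
  | nil => rfl
  | cons lvl0 rest =>
      have h0 : lvl0.map (pvFirstA (pvLabeled line)) = lvl0.map (pvSpan (pvLabeled line) (lvl0 :: rest) 0) := by
        apply List.map_congr_left
        intro node _
        cases node <;> rfl
      have hk0 : PySem.List.pyGet? (lvl0 :: rest) ((0 : Nat) : Int) = some lvl0 := by
        simp
      show (lvl0.map (pvFirstA (pvLabeled line))) :: pvLoopA (lvl0.map (pvFirstA (pvLabeled line))) rest = _
      rw [h0, pvLoop_eq (pvLabeled line) (lvl0 :: rest) rest 0 lvl0 hk0 rfl hPre.2]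
      rfl
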